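-- pv_equiv track=rewrite | github.com/nasif1731/CodeNarrator | app.py | clean_tokens_for_display
-- ===== SOURCE A (Python) =====
-- def clean_tokens_for_display(tokens):
--     """Clean BPE tokens for user-friendly display"""
--     cleaned_tokens = []
--     for token in tokens:
--         clean_token = token.replace('</w>', '')
--         clean_token = clean_token.replace('<unk>', '[UNK]')
--         clean_token = clean_token.replace('<pad>', '[PAD]')
--         clean_token = clean_token.replace('<bos>', '[START]')
--         clean_token = clean_token.replace('<eos>', '[END]')
--         if clean_token.strip():
--             cleaned_tokens.append(clean_token)
--     return cleaned_tokens
-- ===== SOURCE B (Python) =====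
-- _MARKER_MAP = {
--     '<unk>': '[UNK]',
--     '<pad>': '[PAD]',
--     '<bos>': '[START]',
--     '<eos>': '[END]',
-- }
--
--
-- def _clean_one(token):
--     # drop the end-of-word markers first, then rewrite the four special
--     # markers in a single left-to-right table-driven scan
--     token = token.replace('</w>', '')
--     parts = []
--     i = 0
--     n = len(token)
--     while i < n:
--         rep = _MARKER_MAP.get(token[i:i + 5])
--         if rep is not None:
--             parts.append(rep)
--             i += 5
--         else:
--             parts.append(token[i])
--             i += 1
--     return ''.join(parts)
--
--
-- def clean_tokens_for_display(tokens):
--     """Clean BPE tokens for user-friendly display"""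
--     return [t for t in (_clean_one(tok) for tok in tokens) if t.strip()]
-- ===== Notes on version B (the rewrite author's own statement) =====
-- stated objective: alternative
-- what changed: Replaces the chain of four marker .replace() calls by one dict of marker->replacement applied in a single left-to-right table-driven scan per token ('</w>' is still dropped first, since its removal may create a marker that the chained version then rewrites), and builds the result as a comprehension instead of an accumulator loop.
import Mathlib
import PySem

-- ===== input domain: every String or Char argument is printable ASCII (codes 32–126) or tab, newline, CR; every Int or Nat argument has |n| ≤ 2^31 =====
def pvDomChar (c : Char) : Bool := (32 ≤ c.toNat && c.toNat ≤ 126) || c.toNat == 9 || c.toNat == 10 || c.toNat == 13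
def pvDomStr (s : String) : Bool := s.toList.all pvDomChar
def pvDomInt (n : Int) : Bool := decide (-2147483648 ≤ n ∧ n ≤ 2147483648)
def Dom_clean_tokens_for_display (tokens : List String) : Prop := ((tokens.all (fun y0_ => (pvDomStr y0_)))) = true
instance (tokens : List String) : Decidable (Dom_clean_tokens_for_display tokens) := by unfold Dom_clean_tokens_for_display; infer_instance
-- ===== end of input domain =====

set_option maxRecDepth 4000


-- B replaces A's chain of four marker .replace() calls by one table-driven left-to-right scan
-- per token ('</w>' is still dropped first); alternative structure, same cost, return value proved equal.

-- ===== PORT A =====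
def clean_tokens_for_display (tokens : List String) : List String :=
  tokens.foldl (fun cleaned_tokens token =>
    let c1 := PySem.Str.replace token "</w>" ""
    let c2 := PySem.Str.replace c1 "<unk>" "[UNK]"
    let c3 := PySem.Str.replace c2 "<pad>" "[PAD]"
    let c4 := PySem.Str.replace c3 "<bos>" "[START]"
    let c5 := PySem.Str.replace c4 "<eos>" "[END]"
    if PySem.Str.strip c5 ≠ "" then cleaned_tokens ++ [c5] else cleaned_tokens) []

-- ===== PORT B =====
-- the module-level _MARKER_MAP dict of Source B (association list, insertion order)
def pvMarkerMap : List (List Char × List Char) :=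
  [("<unk>".toList, "[UNK]".toList), ("<pad>".toList, "[PAD]".toList),
   ("<bos>".toList, "[START]".toList), ("<eos>".toList, "[END]".toList)]

-- the while-loop of _clean_one: at each position look the next 5 chars up in the table
def pvScan : List Char → List Char
  | [] => []
  | c :: t =>
    match pvMarkerMap.lookup ((c :: t).take 5) with
    | some rep => rep ++ pvScan (t.drop 4)
    | none => c :: pvScan t
termination_by l => l.length
decreasing_by
  all_goals (simp only [List.length_drop, List.length_cons]; omega)

def pvCleanOne (token : String) : String :=
  String.ofList (pvScan (PySem.Str.replace token "</w>" "").toList)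

def clean_tokens_for_display_alt (tokens : List String) : List String :=
  (tokens.map pvCleanOne).filter (fun t => PySem.Str.strip t != "")

-- ===== PRECONDITION & SPEC =====
def Spec_clean_tokens_for_display (tokens : List String) (out : List String) : Prop := out = clean_tokens_for_display_alt tokens
instance (tokens : List String) (out : List String) : Decidable (Spec_clean_tokens_for_display tokens out) := by unfold Spec_clean_tokens_for_display; infer_instance

-- ===== CLAIM (what is proved, stated in full; the proofs are below) =====
def Claim_equal_clean_tokens_for_display : Prop := ∀ (tokens : List String), Dom_clean_tokens_for_display tokens → Spec_clean_tokens_for_display tokens (clean_tokens_for_display tokens)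

-- ===== LEMMAS AND PROOFS =====

-- the four markers and their replacements, as plain character lists
def pvUnk : List Char := ['<', 'u', 'n', 'k', '>']
def pvPad : List Char := ['<', 'p', 'a', 'd', '>']
def pvBos : List Char := ['<', 'b', 'o', 's', '>']
def pvEos : List Char := ['<', 'e', 'o', 's', '>']
def pvUNK : List Char := ['[', 'U', 'N', 'K', ']']
def pvPAD : List Char := ['[', 'P', 'A', 'D', ']']
def pvSTART : List Char := ['[', 'S', 'T', 'A', 'R', 'T', ']']
def pvEND : List Char := ['[', 'E', 'N', 'D', ']']

lemma pvMarkerMap_eq :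
    pvMarkerMap = [(pvUnk, pvUNK), (pvPad, pvPAD), (pvBos, pvSTART), (pvEos, pvEND)] := rfl

-- fuel-free reformulation of PySem.Chars.replace (for nonempty `old`)
def pvRep (old new : List Char) : List Char → List Char
  | [] => []
  | c :: t =>
    if old.isPrefixOf (c :: t) then new ++ pvRep old new (t.drop (old.length - 1))
    else c :: pvRep old new t
termination_by l => l.length
decreasing_by
  all_goals (simp only [List.length_drop, List.length_cons]; omega)

lemma pvGo_eq (old new : List Char) (h : old ≠ []) :
    ∀ (fuel : ℕ) (l acc : List Char), l.length ≤ fuel →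
      PySem.Chars.replace.go old new fuel l acc = acc.reverse ++ pvRep old new l := by
  intro fuel
  induction fuel with
  | zero =>
    intro l acc hl
    have : l = [] := List.length_eq_zero_iff.mp (Nat.le_zero.mp hl)
    subst this
    rw [PySem.Chars.replace.go.eq_def, pvRep]
    try simp
  | succ n ih =>
    intro l acc hl
    cases l with
    | nil => rw [PySem.Chars.replace.go.eq_def, pvRep]; simp
    | cons c t =>
      rw [PySem.Chars.replace.go.eq_3, pvRep]
      by_cases hp : old.isPrefixOf (c :: t) = true
      · rw [if_pos hp, if_pos hp]
        obtain ⟨o, os, rfl⟩ : ∃ o os, old = o :: os := by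
          cases old with
          | nil => exact absurd rfl h
          | cons o os => exact ⟨o, os, rfl⟩
        have hd : List.drop (o :: os).length (c :: t) = t.drop ((o :: os).length - 1) := by
          simp
        rw [hd, ih _ _ (by
          have h1 : (t.drop ((o :: os).length - 1)).length = t.length - ((o :: os).length - 1) :=
            List.length_drop
          simp only [List.length_cons] at hl
          omega)]
        simp
      · rw [if_neg hp, if_neg hp]
        rw [ih t (c :: acc) (by simp only [List.length_cons] at hl; omega)]
        simp

lemma replace_eq_pvRep (old new l : List Char) (h : old ≠ []) :
    PySem.Chars.replace l old new = pvRep old new l := by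
  unfold PySem.Chars.replace
  rw [if_neg (by simp [h]), pvGo_eq old new h l.length l [] le_rfl]
  simp

-- pvRep passes unchanged over a block with no '<' (the pattern starts with '<')
lemma pvRep_append_clean (X Y : List Char) (hX : X.head? = some '<') :
    ∀ (w s : List Char), (∀ c ∈ w, c ≠ '<') → pvRep X Y (w ++ s) = w ++ pvRep X Y s := by
  intro w
  induction w with
  | nil => intro s _; simp
  | cons a w' ih =>
    intro s hw
    obtain ⟨X', rfl⟩ : ∃ X', X = '<' :: X' := by
      cases X with
      | nil => simp at hX
      | cons x xs => simp at hX; subst hX; exact ⟨xs, rfl⟩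
    have ha : a ≠ '<' := hw a (by simp)
    rw [List.cons_append, pvRep]
    rw [if_neg (by simp [List.isPrefixOf]; intro hc; exact absurd hc.symm ha)]
    rw [ih s (fun c hc => hw c (by simp [hc]))]
    simp

-- a prefix test over an append is decided inside the longer left block
lemma isPrefixOf_append_of_length_le (X : List Char) :
    ∀ (w s : List Char), X.length ≤ w.length → X.isPrefixOf (w ++ s) = X.isPrefixOf w := by
  induction X with
  | nil => intro w s _; simp [List.isPrefixOf]
  | cons x xs ih =>
    intro w s hlen
    cases w with
    | nil => simp at hlen
    | cons a w' =>
      simp only [List.cons_append, List.isPrefixOf]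
      rw [ih w' s (by simp at hlen; omega)]

-- pvRep passes unchanged over a whole block w of which X is not a prefix and whose tail has no '<'
lemma pvRep_skip (X Y w : List Char) (hX : X.head? = some '<')
    (hlen : X.length ≤ w.length) (h0 : X.isPrefixOf w = false)
    (hcl : ∀ c ∈ w.tail, c ≠ '<') :
    ∀ s, pvRep X Y (w ++ s) = w ++ pvRep X Y s := by
  intro s
  cases w with
  | nil =>
    have : X = [] := List.length_eq_zero_iff.mp (Nat.le_zero.mp hlen)
    subst this; simp at hX
  | cons a w' =>
    rw [List.cons_append, pvRep]
    rw [if_neg (by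
      rw [show a :: (w' ++ s) = (a :: w') ++ s from rfl,
          isPrefixOf_append_of_length_le X (a :: w') s hlen, h0]
      exact Bool.false_ne_true)]
    rw [pvRep_append_clean X Y hX w' s (by simpa using hcl)]
    simp

-- a prefix test by a word with all chars outside {'<','['} is unchanged by pvRep
lemma pvRep_isPrefixOf (X Y : List Char) (hX : X.head? = some '<') (hY : Y.head? = some '[') :
    ∀ (n : ℕ) (s w : List Char), s.length ≤ n → (∀ c ∈ w, c ≠ '<' ∧ c ≠ '[') →
      w.isPrefixOf (pvRep X Y s) = w.isPrefixOf s := by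
  intro n
  induction n with
  | zero =>
    intro s w hs _
    have : s = [] := List.length_eq_zero_iff.mp (Nat.le_zero.mp hs)
    subst this; rw [pvRep]
  | succ n ih =>
    intro s w hs hw
    cases s with
    | nil => rw [pvRep]
    | cons c t =>
      rw [pvRep]
      by_cases hp : X.isPrefixOf (c :: t) = true
      · rw [if_pos hp]
        obtain ⟨Y', rfl⟩ : ∃ Y', Y = '[' :: Y' := by
          cases Y with
          | nil => simp at hY
          | cons y ys => simp at hY; subst hY; exact ⟨ys, rfl⟩
        obtain ⟨X', rfl⟩ : ∃ X', X = '<' :: X' := by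
          cases X with
          | nil => simp at hX
          | cons x xs => simp at hX; subst hX; exact ⟨xs, rfl⟩
        have hc : c = '<' := by
          simp [List.isPrefixOf] at hp; exact hp.1.symm
        cases w with
        | nil => simp [List.isPrefixOf]
        | cons a w' =>
          have ha := hw a (by simp)
          simp only [List.cons_append, List.isPrefixOf]
          have e1 : (a == '[') = false := by simp [ha.2]
          have e2 : (a == c) = false := by rw [hc]; simp [ha.1]
          rw [e1, e2]
          simp
      · rw [if_neg hp]
        cases w with
        | nil => simp [List.isPrefixOf]
        | cons a w' =>
          simp only [List.isPrefixOf]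
          rw [ih t w' (by simp only [List.length_cons] at hs; omega)
               (fun c hc => hw c (by simp [hc]))]

-- a '<'-headed marker prefix test through `c :: pvRep X Y t`
lemma prefix_cons_pvRep (X Y m' : List Char) (c : Char) (t : List Char)
    (hX : X.head? = some '<') (hY : Y.head? = some '[')
    (hm : ∀ ch ∈ m', ch ≠ '<' ∧ ch ≠ '[') :
    ('<' :: m').isPrefixOf (c :: pvRep X Y t) = ('<' :: m').isPrefixOf (c :: t) := by
  simp only [List.isPrefixOf]
  rw [pvRep_isPrefixOf X Y hX hY t.length t m' le_rfl hm]

-- the chain of the four marker replacements of A (after '</w>' removal)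
def pvChain (l : List Char) : List Char :=
  pvRep pvEos pvEND (pvRep pvBos pvSTART (pvRep pvPad pvPAD (pvRep pvUnk pvUNK l)))

lemma pvChain_nil : pvChain [] = [] := by
  unfold pvChain; rw [pvRep, pvRep, pvRep, pvRep]

-- a marker at the head: the chain replaces it and moves on
lemma pvChain_marker (m rep r : List Char)
    (hmem : (m, rep) ∈ [(pvUnk, pvUNK), (pvPad, pvPAD), (pvBos, pvSTART), (pvEos, pvEND)]) :
    pvChain (m ++ r) = rep ++ pvChain r := by
  fin_cases hmem
  · unfold pvChain
    rw [show (pvUnk ++ r : List Char) = '<' :: (['u', 'n', 'k', '>'] ++ r) from rfl, pvRep,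
        if_pos (by simp [pvUnk, List.isPrefixOf]),
        show (List.drop (pvUnk.length - 1) (['u', 'n', 'k', '>'] ++ r)) = r from by simp [pvUnk]]
    rw [pvRep_skip pvPad pvPAD pvUNK rfl (by simp [pvPad, pvUNK]) (by simp [pvPad, pvUNK, List.isPrefixOf]) (by simp [pvUNK]),
        pvRep_skip pvBos pvSTART pvUNK rfl (by simp [pvBos, pvUNK]) (by simp [pvBos, pvUNK, List.isPrefixOf]) (by simp [pvUNK]),
        pvRep_skip pvEos pvEND pvUNK rfl (by simp [pvEos, pvUNK]) (by simp [pvEos, pvUNK, List.isPrefixOf]) (by simp [pvUNK])]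
  · unfold pvChain
    rw [pvRep_skip pvUnk pvUNK pvPad rfl (by simp [pvUnk, pvPad]) (by simp [pvUnk, pvPad, List.isPrefixOf]) (by simp [pvPad])]
    rw [show (pvPad ++ pvRep pvUnk pvUNK r : List Char)
          = '<' :: (['p', 'a', 'd', '>'] ++ pvRep pvUnk pvUNK r) from rfl, pvRep,
        if_pos (by simp [pvPad, List.isPrefixOf]),
        show (List.drop (pvPad.length - 1) (['p', 'a', 'd', '>'] ++ pvRep pvUnk pvUNK r))
          = pvRep pvUnk pvUNK r from by simp [pvPad]]
    rw [pvRep_skip pvBos pvSTART pvPAD rfl (by simp [pvBos, pvPAD]) (by simp [pvBos, pvPAD, List.isPrefixOf]) (by simp [pvPAD]),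
        pvRep_skip pvEos pvEND pvPAD rfl (by simp [pvEos, pvPAD]) (by simp [pvEos, pvPAD, List.isPrefixOf]) (by simp [pvPAD])]
  · unfold pvChain
    rw [pvRep_skip pvUnk pvUNK pvBos rfl (by simp [pvUnk, pvBos]) (by simp [pvUnk, pvBos, List.isPrefixOf]) (by simp [pvBos]),
        pvRep_skip pvPad pvPAD pvBos rfl (by simp [pvPad, pvBos]) (by simp [pvPad, pvBos, List.isPrefixOf]) (by simp [pvBos])]
    rw [show (pvBos ++ pvRep pvPad pvPAD (pvRep pvUnk pvUNK r) : List Char)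
          = '<' :: (['b', 'o', 's', '>'] ++ pvRep pvPad pvPAD (pvRep pvUnk pvUNK r)) from rfl, pvRep,
        if_pos (by simp [pvBos, List.isPrefixOf]),
        show (List.drop (pvBos.length - 1) (['b', 'o', 's', '>'] ++ pvRep pvPad pvPAD (pvRep pvUnk pvUNK r)))
          = pvRep pvPad pvPAD (pvRep pvUnk pvUNK r) from by simp [pvBos]]
    rw [pvRep_skip pvEos pvEND pvSTART rfl (by simp [pvEos, pvSTART]) (by simp [pvEos, pvSTART, List.isPrefixOf]) (by simp [pvSTART])]
  · unfold pvChain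
    rw [pvRep_skip pvUnk pvUNK pvEos rfl (by simp [pvUnk, pvEos]) (by simp [pvUnk, pvEos, List.isPrefixOf]) (by simp [pvEos]),
        pvRep_skip pvPad pvPAD pvEos rfl (by simp [pvPad, pvEos]) (by simp [pvPad, pvEos, List.isPrefixOf]) (by simp [pvEos]),
        pvRep_skip pvBos pvSTART pvEos rfl (by simp [pvBos, pvEos]) (by simp [pvBos, pvEos, List.isPrefixOf]) (by simp [pvEos])]
    rw [show (pvEos ++ pvRep pvBos pvSTART (pvRep pvPad pvPAD (pvRep pvUnk pvUNK r)) : List Char)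
          = '<' :: (['e', 'o', 's', '>'] ++ pvRep pvBos pvSTART (pvRep pvPad pvPAD (pvRep pvUnk pvUNK r))) from rfl, pvRep,
        if_pos (by simp [pvEos, List.isPrefixOf]),
        show (List.drop (pvEos.length - 1) (['e', 'o', 's', '>'] ++ pvRep pvBos pvSTART (pvRep pvPad pvPAD (pvRep pvUnk pvUNK r))))
          = pvRep pvBos pvSTART (pvRep pvPad pvPAD (pvRep pvUnk pvUNK r)) from by simp [pvEos]]

-- no marker at the head: the chain copies the head character
lemma pvChain_cons (c : Char) (t : List Char)
    (h1 : pvUnk.isPrefixOf (c :: t) = false)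
    (h2 : pvPad.isPrefixOf (c :: t) = false)
    (h3 : pvBos.isPrefixOf (c :: t) = false)
    (h4 : pvEos.isPrefixOf (c :: t) = false) :
    pvChain (c :: t) = c :: pvChain t := by
  unfold pvChain
  rw [pvRep, if_neg (by rw [h1]; exact Bool.false_ne_true)]
  rw [pvRep, if_neg (by
        rw [show (pvPad : List Char) = '<' :: ['p', 'a', 'd', '>'] from rfl,
            prefix_cons_pvRep pvUnk pvUNK _ c t rfl rfl (by simp),
            show ('<' :: ['p', 'a', 'd', '>'] : List Char) = pvPad from rfl, h2]
        exact Bool.false_ne_true)]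
  rw [pvRep, if_neg (by
        rw [show (pvBos : List Char) = '<' :: ['b', 'o', 's', '>'] from rfl,
            prefix_cons_pvRep pvPad pvPAD _ c _ rfl rfl (by simp),
            prefix_cons_pvRep pvUnk pvUNK _ c t rfl rfl (by simp),
            show ('<' :: ['b', 'o', 's', '>'] : List Char) = pvBos from rfl, h3]
        exact Bool.false_ne_true)]
  rw [pvRep, if_neg (by
        rw [show (pvEos : List Char) = '<' :: ['e', 'o', 's', '>'] from rfl,
            prefix_cons_pvRep pvBos pvSTART _ c _ rfl rfl (by simp),
            prefix_cons_pvRep pvPad pvPAD _ c _ rfl rfl (by simp),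
            prefix_cons_pvRep pvUnk pvUNK _ c t rfl rfl (by simp),
            show ('<' :: ['e', 'o', 's', '>'] : List Char) = pvEos from rfl, h4]
        exact Bool.false_ne_true)]

lemma pvScan_eq_pvChain : ∀ (n : ℕ) (l : List Char), l.length ≤ n → pvScan l = pvChain l := by
  intro n
  induction n with
  | zero =>
    intro l hl
    have : l = [] := List.length_eq_zero_iff.mp (Nat.le_zero.mp hl)
    subst this; rw [pvScan, pvChain_nil]
  | succ n ih =>
    intro l hl
    by_cases hm : ∃ p ∈ [(pvUnk, pvUNK), (pvPad, pvPAD), (pvBos, pvSTART), (pvEos, pvEND)],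
        p.1.isPrefixOf l = true
    · obtain ⟨⟨m, rep⟩, hmem, hp⟩ := hm
      obtain ⟨r, rfl⟩ : ∃ r, l = m ++ r := by
        obtain ⟨r, hr⟩ := List.isPrefixOf_iff_prefix.mp hp
        exact ⟨r, hr.symm⟩
      have hm5 : m.length = 5 := by fin_cases hmem <;> rfl
      have hcons : ∃ c t, m ++ r = c :: t ∧ t.drop 4 = r := by
        fin_cases hmem <;> exact ⟨_, _, rfl, by simp⟩
      obtain ⟨c, t, hct, hdrop⟩ := hcons
      have htake : (c :: t).take 5 = m := by rw [← hct, ← hm5, List.take_left]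
      have hlook : pvMarkerMap.lookup m = some rep := by fin_cases hmem <;> rfl
      rw [hct, pvScan, htake, hlook]
      show rep ++ pvScan (t.drop 4) = pvChain (c :: t)
      rw [hdrop, ← hct, pvChain_marker m rep r hmem,
          ih r (by
            have := congrArg List.length hct
            simp only [List.length_append, List.length_cons, hm5] at this hl
            omega)]
    · push Not at hm
      cases l with
      | nil => rw [pvScan, pvChain_nil]
      | cons c t =>
        have key : ∀ p ∈ [(pvUnk, pvUNK), (pvPad, pvPAD), (pvBos, pvSTART), (pvEos, pvEND)],
            (p.1).isPrefixOf (c :: t) = false := by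
          intro p hpm
          exact Bool.eq_false_iff.mpr (hm p hpm)
        have hne : ∀ p ∈ [(pvUnk, pvUNK), (pvPad, pvPAD), (pvBos, pvSTART), (pvEos, pvEND)],
            ((c :: t).take 5 == p.1) = false := by
          intro p hpm
          rw [beq_eq_false_iff_ne]
          intro heq
          have hm5 : p.1.length = 5 := by fin_cases hpm <;> rfl
          have hpre : p.1 <+: (c :: t) := by
            rw [List.prefix_iff_eq_take, hm5, heq]
          have := List.isPrefixOf_iff_prefix.mpr hpre
          rw [key p hpm] at this
          exact Bool.false_ne_true this
        have hlook : pvMarkerMap.lookup ((c :: t).take 5) = none := by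
          rw [pvMarkerMap_eq]
          simp only [List.lookup,
            hne (pvUnk, pvUNK) (by simp), hne (pvPad, pvPAD) (by simp),
            hne (pvBos, pvSTART) (by simp), hne (pvEos, pvEND) (by simp)]
        rw [pvScan, hlook]
        show c :: pvScan t = pvChain (c :: t)
        rw [pvChain_cons c t
              (key (pvUnk, pvUNK) (by simp)) (key (pvPad, pvPAD) (by simp))
              (key (pvBos, pvSTART) (by simp)) (key (pvEos, pvEND) (by simp)),
            ih t (by simp only [List.length_cons] at hl; omega)]

-- per-token: A's four chained marker replaces equal B's table-driven scan
lemma cleanTok_eq (token : String) :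
    PySem.Str.replace (PySem.Str.replace (PySem.Str.replace (PySem.Str.replace
      (PySem.Str.replace token "</w>" "") "<unk>" "[UNK]") "<pad>" "[PAD]")
      "<bos>" "[START]") "<eos>" "[END]" = pvCleanOne token := by
  apply String.toList_injective
  rw [pvCleanOne, String.toList_ofList]
  rw [PySem.Str.toList_replace, PySem.Str.toList_replace, PySem.Str.toList_replace,
      PySem.Str.toList_replace]
  rw [replace_eq_pvRep _ _ _ (by intro hc; exact List.cons_ne_nil _ _ hc),
      replace_eq_pvRep _ _ _ (by intro hc; exact List.cons_ne_nil _ _ hc),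
      replace_eq_pvRep _ _ _ (by intro hc; exact List.cons_ne_nil _ _ hc),
      replace_eq_pvRep _ _ _ (by intro hc; exact List.cons_ne_nil _ _ hc)]
  rw [pvScan_eq_pvChain _ _ le_rfl]
  rfl

lemma foldl_eq_filter_map (tokens : List String) :
    ∀ acc : List String,
      tokens.foldl (fun cleaned_tokens token =>
        let c1 := PySem.Str.replace token "</w>" ""
        let c2 := PySem.Str.replace c1 "<unk>" "[UNK]"
        let c3 := PySem.Str.replace c2 "<pad>" "[PAD]"
        let c4 := PySem.Str.replace c3 "<bos>" "[START]"
        let c5 := PySem.Str.replace c4 "<eos>" "[END]"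
        if PySem.Str.strip c5 ≠ "" then cleaned_tokens ++ [c5] else cleaned_tokens) acc
      = acc ++ (tokens.map pvCleanOne).filter (fun t => PySem.Str.strip t != "") := by
  induction tokens with
  | nil => intro acc; simp
  | cons tok ts ih =>
    intro acc
    simp only [List.foldl_cons, List.map_cons, List.filter_cons]
    rw [cleanTok_eq tok]
    by_cases hs : PySem.Str.strip (pvCleanOne tok) = ""
    · rw [if_neg (by simp [hs]), if_neg (by simp [hs]), ih acc]
    · rw [if_pos (by simp [hs]), if_pos (by simp [hs]), ih (acc ++ [pvCleanOne tok])]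
      simp

-- ===== VERDICT (by name: the statement is the Claim_ definition above) =====
theorem clean_tokens_for_display_spec : Claim_equal_clean_tokens_for_display := by
  intro tokens _
  show clean_tokens_for_display tokens = clean_tokens_for_display_alt tokens
  unfold clean_tokens_for_display clean_tokens_for_display_alt
  rw [foldl_eq_filter_map tokens []]
  simp
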